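-- pv_equiv track=rewrite | github.com/Dave-Meloncelli/RPG-Reliquary-UI-Interface | captured_content/captured_octospine_fusion_analyzer.py | _find_pattern_synergies
-- ===== SOURCE A (Python) =====
-- from typing import Dict, List, Set, Tuple, Any
--
-- def _find_pattern_synergies(pattern_mentions: Dict[str, int]) -> Dict[str, List[str]]:
--     """Find synergistic relationships between integration patterns."""
--     pattern_synergies = {
--         'symbolic_sdk': ['temporal_binding', 'constellation_binding'],
--         'temporal_binding': ['constellation_binding', 'sentient_tethering'],
--         'constellation_binding': ['sentient_tethering', 'multi_node_resilience'],
--         'sentient_tethering': ['multi_node_resilience'],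
--         'multi_node_resilience': ['symbolic_sdk']
--     }
--
--     synergies = {}
--     for pattern, mentions in pattern_mentions.items():
--         if pattern in pattern_synergies:
--             synergies[pattern] = pattern_synergies[pattern]
--
--     return synergies
-- ===== SOURCE B (Python) =====
-- def _find_pattern_synergies(pattern_mentions):
--     """Find synergistic relationships between integration patterns."""
--     pattern_synergies = {
--         'symbolic_sdk': ['temporal_binding', 'constellation_binding'],
--         'temporal_binding': ['constellation_binding', 'sentient_tethering'],
--         'constellation_binding': ['sentient_tethering', 'multi_node_resilience'],
--         'sentient_tethering': ['multi_node_resilience'],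
--         'multi_node_resilience': ['symbolic_sdk']
--     }
--
--     def matched(keys):
--         # recursively build the (pattern, synergy-list) pairs, back to front
--         if not keys:
--             return []
--         tail = matched(keys[1:])
--         head = keys[0]
--         if head in pattern_synergies:
--             return [(head, pattern_synergies[head])] + tail
--         return tail
--
--     return dict(matched(list(pattern_mentions)))
-- ===== Notes on version B (the rewrite author's own statement) =====
-- stated objective: alternative
-- what changed: B replaces A's loop that conditionally inserts into a result dict with a back-to-front recursion that builds the filtered (pattern, synergies) pair list and constructs one dict from it at the end.
import Mathlib
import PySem

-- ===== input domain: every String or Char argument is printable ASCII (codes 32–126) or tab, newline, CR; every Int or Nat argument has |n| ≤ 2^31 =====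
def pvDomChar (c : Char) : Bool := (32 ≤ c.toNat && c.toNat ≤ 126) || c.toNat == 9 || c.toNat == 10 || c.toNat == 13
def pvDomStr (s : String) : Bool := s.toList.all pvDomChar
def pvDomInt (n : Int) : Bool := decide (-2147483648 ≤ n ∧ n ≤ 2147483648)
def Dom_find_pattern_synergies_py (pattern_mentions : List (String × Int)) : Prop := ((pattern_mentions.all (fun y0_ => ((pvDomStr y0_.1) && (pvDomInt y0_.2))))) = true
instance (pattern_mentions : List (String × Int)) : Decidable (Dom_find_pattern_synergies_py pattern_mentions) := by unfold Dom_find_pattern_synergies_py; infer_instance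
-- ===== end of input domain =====

-- B builds the matched (pattern, synergies) pairs by recursion over the key list and makes one
-- dict at the end, instead of A's loop that conditionally inserts into a dict (alternative decomposition).

-- the fixed synergy table (shared data constant)
def pvSynergyTable : PySem.Dict String (List String) :=
  PySem.Dict.ofList
    [ ("symbolic_sdk", ["temporal_binding", "constellation_binding"]),
      ("temporal_binding", ["constellation_binding", "sentient_tethering"]),
      ("constellation_binding", ["sentient_tethering", "multi_node_resilience"]),
      ("sentient_tethering", ["multi_node_resilience"]),
      ("multi_node_resilience", ["symbolic_sdk"]) ]

-- ===== PORT A =====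
-- for pattern, mentions in pattern_mentions.items(): if pattern in table: synergies[pattern] = table[pattern]
def find_pattern_synergies_py (pattern_mentions : List (String × Int)) : List (String × List String) :=
  (pattern_mentions.foldl
    (fun (synergies : PySem.Dict String (List String)) pm =>
      if pvSynergyTable.contains pm.1 then
        synergies.insert pm.1 (pvSynergyTable.getD pm.1 [])
      else synergies)
    PySem.Dict.empty).items

-- ===== PORT B =====
-- matched(keys): recursive, back-to-front filtered pair list
def pvMatched : List String → List (String × List String)
  | [] => []
  | head :: rest =>
      let tail := pvMatched rest
      match pvSynergyTable.get? head with
      | some v => (head, v) :: tail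
      | none => tail

-- dict(matched(list(pattern_mentions)))
def find_pattern_synergies_py_alt (pattern_mentions : List (String × Int)) : List (String × List String) :=
  ((pvMatched (pattern_mentions.map Prod.fst)).foldl
    (fun (d : PySem.Dict String (List String)) p => d.insert p.1 p.2)
    PySem.Dict.empty).items

-- ===== PRECONDITION & SPEC =====
def Spec_find_pattern_synergies_py (pattern_mentions : List (String × Int)) (out : List (String × List String)) : Prop := out = find_pattern_synergies_py_alt pattern_mentions
instance (pattern_mentions : List (String × Int)) (out : List (String × List String)) : Decidable (Spec_find_pattern_synergies_py pattern_mentions out) := by unfold Spec_find_pattern_synergies_py; infer_instance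

-- ===== CLAIM (what is proved, stated in full; the proofs are below) =====
def Claim_equal_find_pattern_synergies_py : Prop := ∀ (pattern_mentions : List (String × Int)), Dom_find_pattern_synergies_py pattern_mentions → Spec_find_pattern_synergies_py pattern_mentions (find_pattern_synergies_py pattern_mentions)

-- ===== LEMMAS AND PROOFS =====

-- A's conditional-insert fold over the pairs equals a plain-insert fold over B's matched pair list
theorem pv_fold_matched (l : List (String × Int)) (d : PySem.Dict String (List String)) :
    l.foldl
      (fun (synergies : PySem.Dict String (List String)) pm =>
        if pvSynergyTable.contains pm.1 then
          synergies.insert pm.1 (pvSynergyTable.getD pm.1 [])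
        else synergies) d
    = (pvMatched (l.map Prod.fst)).foldl
        (fun (d : PySem.Dict String (List String)) p => d.insert p.1 p.2) d := by
  induction l generalizing d with
  | nil => rfl
  | cons h t ih =>
      simp only [List.map_cons, List.foldl_cons, pvMatched]
      rcases hg : pvSynergyTable.get? h.1 with _ | v
      · have hc : pvSynergyTable.contains h.1 = false := by
          rw [PySem.Dict.contains_eq_isSome_get?, hg]; rfl
        simp [hc, ih]
      · have hc : pvSynergyTable.contains h.1 = true := by
          rw [PySem.Dict.contains_eq_isSome_get?, hg]; rfl
        have hd : pvSynergyTable.getD h.1 [] = v := PySem.Dict.getD_of_get?_eq_some _ _ hg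
        simp [hc, hd, ih]

-- ===== VERDICT (by name: the statement is the Claim_ definition above) =====
theorem find_pattern_synergies_py_spec : Claim_equal_find_pattern_synergies_py := by
  intro pm _
  unfold Spec_find_pattern_synergies_py find_pattern_synergies_py find_pattern_synergies_py_alt
  rw [pv_fold_matched]
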